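-- pv_equiv track=rewrite | github.com/Autodesk/molecular-design-toolkit | moldesign/utils/docparsers/google.py | _strip_empty
-- ===== SOURCE A (Python) =====
-- def _strip_empty(lines):
--     if lines:
--         start = -1
--         for i, line in enumerate(lines):
--             if line:
--                 start = i
--                 break
--         if start == -1:
--             lines = []
--         end = -1
--         for i in reversed(range(len(lines))):
--             line = lines[i]
--             if line:
--                 end = i
--                 break
--         if start > 0 or end + 1 < len(lines):
--             lines = lines[start:end + 1]
--     return lines
-- ===== SOURCE B (Python) =====
-- def _strip_empty(lines):
--     idx = [i for i, line in enumerate(lines) if line]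
--     if idx:
--         return lines[idx[0]:idx[-1] + 1]
--     return [] if lines else lines
-- ===== Notes on version B (the rewrite author's own statement) =====
-- stated objective: simpler
-- what changed: Replaces A's two bounded end-scans with break plus a conditional slice by one forward pass that builds the list of non-empty-line indices and then slices between its first and last entry.
import Mathlib
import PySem

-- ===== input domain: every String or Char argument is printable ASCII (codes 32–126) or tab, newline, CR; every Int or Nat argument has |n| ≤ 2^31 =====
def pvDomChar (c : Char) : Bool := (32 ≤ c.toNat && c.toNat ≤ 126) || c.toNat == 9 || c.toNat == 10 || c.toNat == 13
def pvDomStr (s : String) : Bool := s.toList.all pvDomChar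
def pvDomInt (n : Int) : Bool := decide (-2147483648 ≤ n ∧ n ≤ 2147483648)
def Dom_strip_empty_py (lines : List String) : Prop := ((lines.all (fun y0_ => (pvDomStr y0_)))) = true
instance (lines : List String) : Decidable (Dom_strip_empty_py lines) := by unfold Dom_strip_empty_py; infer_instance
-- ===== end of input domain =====

-- B replaces A's two end-scans-with-break plus conditional slice by one forward pass building
-- the index list of non-empty lines and slicing between its first and last entry (objective: simpler).

-- Python truthiness of a string: non-empty (shared by both ports)
def pyTruthy (s : String) : Bool := !(s.toList.isEmpty)

-- ===== PORT A =====
-- first loop: enumerate with break, sentinel -1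
def aFindStart : List String → Int → Int
  | [], _ => -1
  | l :: ls, i => if pyTruthy l then i else aFindStart ls (i + 1)

-- second loop: for i in reversed(range(len(lines))), break at first truthy, sentinel -1
def aFindEnd (lines : List String) : Nat → Int
  | 0 => -1
  | n + 1 => if pyTruthy (lines.getD n "") then (n : Int) else aFindEnd lines n

def strip_empty_py (lines : List String) : List String :=
  if lines.isEmpty then lines
  else
    let start := aFindStart lines 0
    let lines1 := if start = -1 then ([] : List String) else lines
    let e := aFindEnd lines1 lines1.length
    if start > 0 ∨ e + 1 < (lines1.length : Int) then
      PySem.List.slice lines1 (some start) (some (e + 1))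
    else lines1

-- ===== PORT B =====
-- the comprehension [i for i, line in enumerate(lines) if line]
def bIdx : List String → Nat → List Nat
  | [], _ => []
  | l :: ls, i => if pyTruthy l then i :: bIdx ls (i + 1) else bIdx ls (i + 1)

def strip_empty_py_alt (lines : List String) : List String :=
  match bIdx lines 0 with
  | i :: rest =>
      PySem.List.slice lines (some (i : Int)) (some (((i :: rest).getLastD 0 : Int) + 1))
  | [] => if lines.isEmpty then lines else []

-- ===== PRECONDITION & SPEC =====
def Spec_strip_empty_py (lines : List String) (out : List String) : Prop := out = strip_empty_py_alt lines
instance (lines : List String) (out : List String) : Decidable (Spec_strip_empty_py lines out) := by unfold Spec_strip_empty_py; infer_instance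

-- ===== CLAIM (what is proved, stated in full; the proofs are below) =====
def Claim_equal_strip_empty_py : Prop := ∀ (lines : List String), Dom_strip_empty_py lines → Spec_strip_empty_py lines (strip_empty_py lines)

-- ===== LEMMAS AND PROOFS =====

theorem findStart_of_bIdx_nil (lines : List String) : ∀ (k : Nat),
    bIdx lines k = [] → aFindStart lines (k : Int) = -1 := by
  induction lines with
  | nil => intro k _; rfl
  | cons l ls ih =>
      intro k h
      simp only [bIdx, aFindStart] at *
      by_cases hl : pyTruthy l
      · simp [hl] at h
      · simp only [hl, Bool.false_eq_true, if_false] at h ⊢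
        rw [show ((k : Int) + 1) = ((k + 1 : Nat) : Int) by push_cast; ring]
        exact ih (k + 1) h

theorem findStart_of_bIdx_cons (lines : List String) : ∀ (k i : Nat) (rest : List Nat),
    bIdx lines k = i :: rest → aFindStart lines (k : Int) = (i : Int) := by
  induction lines with
  | nil => intro k i rest h; simp [bIdx] at h
  | cons l ls ih =>
      intro k i rest h
      simp only [bIdx, aFindStart] at *
      by_cases hl : pyTruthy l
      · simp only [hl, if_true] at h ⊢
        injection h with h1 _
        simp [h1]
      · simp only [hl, Bool.false_eq_true, if_false] at h ⊢
        rw [show ((k : Int) + 1) = ((k + 1 : Nat) : Int) by push_cast; ring]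
        exact ih (k + 1) i rest h

theorem bIdx_append (xs : List String) (l : String) : ∀ (k : Nat),
    bIdx (xs ++ [l]) k = bIdx xs k ++ (if pyTruthy l then [k + xs.length] else []) := by
  induction xs with
  | nil => intro k; by_cases hl : pyTruthy l <;> simp [bIdx, hl]
  | cons x xs ih =>
      intro k
      by_cases hx : pyTruthy x <;>
        simp [bIdx, hx, ih (k + 1), Nat.add_assoc, Nat.add_comm 1 xs.length]

theorem findEnd_append (xs : List String) (l : String) : ∀ (n : Nat), n ≤ xs.length →
    aFindEnd (xs ++ [l]) n = aFindEnd xs n := by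
  intro n
  induction n with
  | zero => intro _; rfl
  | succ m ih =>
      intro h
      have hm : m < xs.length := by omega
      simp only [aFindEnd, List.getD_append xs [l] "" m hm, ih (by omega)]

theorem mem_bIdx_lt (lines : List String) : ∀ (k m : Nat),
    m ∈ bIdx lines k → m < k + lines.length := by
  induction lines with
  | nil => intro k m h; simp [bIdx] at h
  | cons l ls ih =>
      intro k m h
      simp only [bIdx] at h
      by_cases hl : pyTruthy l
      · simp only [hl, if_true, List.mem_cons] at h
        rcases h with rfl | h
        · simp
        · have := ih (k + 1) m h; simp only [List.length_cons]; omega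
      · simp only [hl, Bool.false_eq_true, if_false] at h
        have := ih (k + 1) m h; simp only [List.length_cons]; omega

theorem getLastD_mem : ∀ (l : List Nat) (d : Nat), l ≠ [] → l.getLastD d ∈ l := by
  intro l
  induction l with
  | nil => intro d h; exact absurd rfl h
  | cons a as ih =>
      intro d _
      rw [List.getLastD_cons]
      cases as with
      | nil => simp
      | cons b bs => exact List.mem_cons_of_mem _ (ih a (by simp))

theorem findEnd_eq_getLast (lines : List String) :
    (bIdx lines 0 = [] → aFindEnd lines lines.length = -1) ∧
    (∀ (i : Nat) (rest : List Nat), bIdx lines 0 = i :: rest →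
      aFindEnd lines lines.length = ((i :: rest).getLastD 0 : Int)) := by
  induction lines using List.reverseRecOn with
  | nil => exact ⟨fun _ => rfl, fun i rest h => by simp [bIdx] at h⟩
  | append_singleton xs l ih =>
      have hb := bIdx_append xs l 0
      have hlen : (xs ++ [l]).length = xs.length + 1 := by simp
      have hget : (xs ++ [l]).getD xs.length "" = l := by
        rw [List.getD_eq_getElem?_getD]
        simp
      by_cases hl : pyTruthy l
      · constructor
        · intro h; rw [hb] at h; simp [hl] at h
        · intro i rest h
          rw [hlen]
          simp only [aFindEnd, hget, hl, if_true]
          rw [hb] at h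
          simp only [hl, if_true, Nat.zero_add] at h
          have : (i :: rest).getLastD 0 = xs.length := by
            rw [← h]; exact List.getLastD_concat
          rw [this]
      · have step : aFindEnd (xs ++ [l]) (xs ++ [l]).length = aFindEnd xs xs.length := by
          rw [hlen]
          simp only [aFindEnd, hget, hl, Bool.false_eq_true, if_false]
          exact findEnd_append xs l xs.length (Nat.le_refl _)
        have hb' : bIdx (xs ++ [l]) 0 = bIdx xs 0 := by rw [hb]; simp [hl]
        constructor
        · intro h; rw [hb'] at h; rw [step]; exact ih.1 h
        · intro i rest h; rw [hb'] at h; rw [step]; exact ih.2 i rest h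

-- ===== VERDICT (by name: the statement is the Claim_ definition above) =====
theorem strip_empty_py_spec : Claim_equal_strip_empty_py := by
  intro lines _
  unfold Spec_strip_empty_py strip_empty_py strip_empty_py_alt
  cases hb : bIdx lines 0 with
  | nil =>
      by_cases he : lines.isEmpty
      · simp [he]
      · have hs : aFindStart lines (0 : Int) = -1 := findStart_of_bIdx_nil lines 0 hb
        simp only [he, Bool.false_eq_true, if_false, hs]
        norm_num [aFindEnd]
  | cons i rest =>
      have hs : aFindStart lines (0 : Int) = (i : Int) := findStart_of_bIdx_cons lines 0 i rest hb
      have hne : lines ≠ [] := by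
        intro h; subst h; simp [bIdx] at hb
      have he : lines.isEmpty = false := by simp [hne]
      have hstart_ne : ¬ ((i : Int) = -1) := by omega
      have hend : aFindEnd lines lines.length = ((i :: rest).getLastD 0 : Int) :=
        (findEnd_eq_getLast lines).2 i rest hb
      have hjmem : (i :: rest).getLastD 0 ∈ bIdx lines 0 := by
        rw [hb]; exact getLastD_mem _ 0 (by simp)
      have hjlt : (i :: rest).getLastD 0 < lines.length := by
        have := mem_bIdx_lt lines 0 _ hjmem; omega
      simp only [he, Bool.false_eq_true, if_false, hs, if_neg hstart_ne, hend]
      split_ifs with hc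
      · rfl
      · push Not at hc
        obtain ⟨hc1, hc2⟩ := hc
        have hi0 : i = 0 := by omega
        have hjl : ((i :: rest).getLastD 0 : Int) + 1 = (lines.length : Int) := by omega
        subst hi0
        rw [hjl]
        rw [PySem.List.slice_natCast]
        simp
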